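-- pv_equiv track=rewrite | github.com/jamesc/beamtalk | scripts/convert_tests.py | contains_keyword_message
-- ===== SOURCE A (Python) =====
-- def contains_keyword_message(expr):
--     """Check if expression contains a keyword message (word:) outside strings/brackets."""
--     in_string = False
--     depth = 0
--     i = 0
--     while i < len(expr):
--         c = expr[i]
--         if c == '"':
--             if in_string:
--                 if i + 1 < len(expr) and expr[i + 1] == '"':
--                     i += 2
--                     continue
--                 in_string = False
--             else:
--                 in_string = True
--         elif not in_string:
--             if c in '([{':
--                 depth += 1
--             elif c in ')]}':
--                 depth -= 1
--             elif c == ':' and depth == 0: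
--                 # Check if preceded by a word character (keyword message)
--                 if i > 0 and (expr[i-1].isalnum() or expr[i-1] == '_'):
--                     # But not := (assignment)
--                     if i + 1 < len(expr) and expr[i + 1] == '=':
--                         pass  # := assignment, not keyword
--                     else:
--                         return True
--         i += 1
--     return False
-- ===== SOURCE B (Python) =====
-- def contains_keyword_message(expr):
--     """Check if expression contains a keyword message (word:) outside strings/brackets.
--
--     Two passes: first mask out string literals (doubled-quote escape honored),
--     then scan the masked text tracking bracket depth.
--     """
--     # pass 1: replace every string literal (quotes and contents) by spaces,
--     # keeping all character positions.
--     masked = []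
--     i = 0
--     n = len(expr)
--     while i < n:
--         if expr[i] == '"':
--             masked.append(' ')
--             i += 1
--             while i < n:
--                 if expr[i] == '"':
--                     if i + 1 < n and expr[i + 1] == '"':
--                         masked.append(' ')
--                         masked.append(' ')
--                         i += 2
--                         continue
--                     masked.append(' ')
--                     i += 1
--                     break
--                 masked.append(' ')
--                 i += 1
--         else:
--             masked.append(expr[i])
--             i += 1
--     m = ''.join(masked)
--     # pass 2: bracket depth + colon test on the masked text.
--     depth = 0
--     for j, c in enumerate(m):
--         if c in '([{':
--             depth += 1
--         elif c in ')]}':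
--             depth -= 1
--         elif c == ':' and depth == 0:
--             if j > 0 and (m[j - 1].isalnum() or m[j - 1] == '_'):
--                 if not (j + 1 < n and m[j + 1] == '='):
--                     return True
--     return False
-- ===== Notes on version B (the rewrite author's own statement) =====
-- stated objective: alternative
-- what changed: Replaces A's single-pass scanner with interleaved in_string state by two passes: a string-literal tokenizer that masks every literal (quotes and contents, doubled-quote escape honored) to spaces position-for-position, then a plain bracket-depth/colon scan over the masked text.
import Mathlib
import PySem

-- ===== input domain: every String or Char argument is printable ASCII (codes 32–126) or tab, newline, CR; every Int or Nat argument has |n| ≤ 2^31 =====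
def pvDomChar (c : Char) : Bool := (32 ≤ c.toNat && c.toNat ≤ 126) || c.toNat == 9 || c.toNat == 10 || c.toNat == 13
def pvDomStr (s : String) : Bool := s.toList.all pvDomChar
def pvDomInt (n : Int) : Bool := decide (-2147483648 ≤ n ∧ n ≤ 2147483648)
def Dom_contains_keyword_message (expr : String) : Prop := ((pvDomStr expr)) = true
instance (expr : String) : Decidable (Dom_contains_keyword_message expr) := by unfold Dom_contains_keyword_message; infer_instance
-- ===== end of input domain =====

-- B re-implements A's single-pass in_string/depth scanner as two passes (mask string
-- literals to spaces, then a plain depth/colon scan); objective: alternative decomposition.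

-- word-character test used by both Pythons: c.isalnum() or c == '_' (exact on ASCII)
def pvIsWord (c : Char) : Bool := c.isAlphanum || c = '_'

def pvIsWordOpt (p : Option Char) : Bool :=
  match p with
  | none => false
  | some c => pvIsWord c

-- ===== PORT A =====
-- A's while loop; `prev` is expr[i-1] (none at i = 0), `rest` carries expr[i+1…].
def pvALoop (cs : List Char) (inStr : Bool) (depth : Int) (prev : Option Char) : Bool :=
  match cs with
  | [] => false
  | c :: rest =>
    if c = '"' then
      if inStr then
        if rest.head? = some '"' then pvALoop rest.tail true depth (some '"')
        else pvALoop rest false depth (some '"')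
      else pvALoop rest true depth (some '"')
    else if inStr then pvALoop rest true depth (some c)
    else if c = '(' ∨ c = '[' ∨ c = '{' then pvALoop rest inStr (depth + 1) (some c)
    else if c = ')' ∨ c = ']' ∨ c = '}' then pvALoop rest inStr (depth - 1) (some c)
    else if c = ':' ∧ depth = 0 then
      if pvIsWordOpt prev then
        if rest.head? = some '=' then pvALoop rest inStr depth (some c)
        else true
      else pvALoop rest inStr depth (some c)
    else pvALoop rest inStr depth (some c)
  termination_by cs.length
  decreasing_by all_goals (simp [List.length_tail]; try omega)

def contains_keyword_message (expr : String) : Bool :=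
  pvALoop expr.toList false 0 none

-- ===== PORT B =====
-- pass 1 of Source B: mask string literals (quotes and contents) to spaces, position for position.
mutual
  def pvMask : List Char → List Char
    | [] => []
    | c :: rest =>
      if c = '"' then ' ' :: pvMaskIn rest
      else c :: pvMask rest
    termination_by cs => cs.length
    decreasing_by all_goals (simp; try omega)
  -- inside a string literal (Source B's inner while loop); doubled quote stays in the string
  def pvMaskIn : List Char → List Char
    | [] => []
    | c :: rest =>
      if c = '"' then
        if rest.head? = some '"' then ' ' :: ' ' :: pvMaskIn rest.tail
        else ' ' :: pvMask rest
      else ' ' :: pvMaskIn rest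
    termination_by cs => cs.length
    decreasing_by all_goals (simp [List.length_tail]; try omega)
end

-- pass 2 of Source B: depth/colon scan over the masked text; `prev` is m[j-1] (none at j = 0).
def pvScan (cs : List Char) (depth : Int) (prev : Option Char) : Bool :=
  match cs with
  | [] => false
  | c :: rest =>
    if c = '(' ∨ c = '[' ∨ c = '{' then pvScan rest (depth + 1) (some c)
    else if c = ')' ∨ c = ']' ∨ c = '}' then pvScan rest (depth - 1) (some c)
    else if c = ':' ∧ depth = 0 then
      if pvIsWordOpt prev then
        if rest.head? = some '=' then pvScan rest depth (some c)
        else true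
      else pvScan rest depth (some c)
    else pvScan rest depth (some c)

def contains_keyword_message_alt (expr : String) : Bool :=
  pvScan (pvMask expr.toList) 0 none

-- ===== PRECONDITION & SPEC =====
def Spec_contains_keyword_message (expr : String) (out : Bool) : Prop := out = contains_keyword_message_alt expr
instance (expr : String) (out : Bool) : Decidable (Spec_contains_keyword_message expr out) := by unfold Spec_contains_keyword_message; infer_instance

-- ===== CLAIM (what is proved, stated in full; the proofs are below) =====
def Claim_equal_contains_keyword_message : Prop := ∀ (expr : String), Dom_contains_keyword_message expr → Spec_contains_keyword_message expr (contains_keyword_message expr)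

-- ===== LEMMAS AND PROOFS =====

-- the next-char '=' test is unaffected by masking: a raw '"' masks to ' ', neither is '='.
theorem pvMask_head_iff (rest : List Char) :
    (pvMask rest).head? = some '=' ↔ rest.head? = some '=' := by
  match rest with
  | [] => simp [pvMask]
  | c :: r =>
    by_cases h : c = '"'
    · subst h; simp [pvMask]
    · simp [pvMask, h]

-- main invariant: A's loop agrees with B's scan over the masked text; outside a string
-- the previous characters need only agree on the word-char test.
theorem pvMain (n : ℕ) : ∀ (cs : List Char), cs.length ≤ n → ∀ (depth : Int) (pA pB : Option Char),
    (pvIsWordOpt pA = pvIsWordOpt pB → pvALoop cs false depth pA = pvScan (pvMask cs) depth pB)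
    ∧ pvALoop cs true depth pA = pvScan (pvMaskIn cs) depth pB := by
  induction n with
  | zero =>
    intro cs hlen depth pA pB
    have : cs = [] := List.length_eq_zero_iff.mp (Nat.le_zero.mp hlen)
    subst this
    simp [pvALoop, pvMask, pvMaskIn, pvScan]
  | succ n ih =>
    intro cs hlen depth pA pB
    match cs with
    | [] => simp [pvALoop, pvMask, pvMaskIn, pvScan]
    | c :: rest =>
      have hr : rest.length ≤ n := by simp at hlen; omega
      constructor
      · -- outside a string
        intro hprev
        by_cases hq : c = '"'
        · subst hq
          simpa [pvALoop, pvMask, pvScan] using (ih rest hr depth (some '"') (some ' ')).2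
        · by_cases hopen : c = '(' ∨ c = '[' ∨ c = '{'
          · simpa [pvALoop, pvMask, pvScan, hq, hopen] using
              (ih rest hr (depth + 1) (some c) (some c)).1 rfl
          · by_cases hclose : c = ')' ∨ c = ']' ∨ c = '}'
            · simpa [pvALoop, pvMask, pvScan, hq, hopen, hclose] using
                (ih rest hr (depth - 1) (some c) (some c)).1 rfl
            · by_cases hcolon : c = ':' ∧ depth = 0
              · obtain ⟨hc, hd⟩ := hcolon
                subst hc; subst hd
                have hrec := (ih rest hr 0 (some ':') (some ':')).1 rfl
                by_cases hw : pvIsWordOpt pA = true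
                · have hw' : pvIsWordOpt pB = true := hprev ▸ hw
                  by_cases he : rest.head? = some '='
                  · have he' : (pvMask rest).head? = some '=' := (pvMask_head_iff rest).mpr he
                    simp [pvALoop, pvMask, pvScan, hw, hw', he, he', hrec]
                  · have he' : ¬ (pvMask rest).head? = some '=' :=
                      fun h => he ((pvMask_head_iff rest).mp h)
                    simp [pvALoop, pvMask, pvScan, hw, hw', he, he']
                · have hw' : ¬ pvIsWordOpt pB = true := by rw [← hprev]; exact hw
                  simp [pvALoop, pvMask, pvScan, hw, hw', hrec]
              · simpa [pvALoop, pvMask, pvScan, hq, hopen, hclose, hcolon] using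
                  (ih rest hr depth (some c) (some c)).1 rfl
      · -- inside a string
        by_cases hq : c = '"'
        · subst hq
          match rest with
          | [] => simp [pvALoop, pvMaskIn, pvMask, pvScan]
          | c2 :: rest2 =>
            by_cases hq2 : c2 = '"'
            · subst hq2
              have hr2 : rest2.length ≤ n := by simp at hlen; omega
              simpa [pvALoop, pvMaskIn, pvScan] using
                (ih rest2 hr2 depth (some '"') (some ' ')).2
            · simpa [pvALoop, pvMaskIn, pvScan, hq2] using
                (ih (c2 :: rest2) hr depth (some '"') (some ' ')).1 (by decide)
        · simpa [pvALoop, pvMaskIn, pvScan, hq] using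
            (ih rest hr depth (some c) (some ' ')).2

-- ===== VERDICT (by name: the statement is the Claim_ definition above) =====
theorem contains_keyword_message_spec : Claim_equal_contains_keyword_message := by
  intro expr _
  unfold Spec_contains_keyword_message contains_keyword_message contains_keyword_message_alt
  exact (pvMain expr.toList.length expr.toList le_rfl 0 none none).1 rfl
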